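-- pv_equiv track=rewrite | github.com/Alexir/YouTube-utilities | webpage/webpage_script_local.py | split_filename
-- ===== SOURCE A (Python) =====
-- def split_filename(filename):
--     """Split filename at the last occurrence of _00., _01., _02., or _03."""
--     patterns = ['_00.', '_01.', '_02.', '_03.']
--     last_pos = -1
--
--     for pattern in patterns:
--         pos = filename.rfind(pattern)
--         if pos > last_pos:
--             last_pos = pos
--
--     if last_pos != -1:
--         return filename[:last_pos], filename[last_pos:]
--     else:
--         return filename, ''
-- ===== SOURCE B (Python) =====
-- def split_filename(filename):
--     """Split filename at the last occurrence of _00., _01., _02., or _03."""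
--     markers = ('_00.', '_01.', '_02.', '_03.')
--     for i in range(len(filename) - 4, -1, -1):
--         if filename[i:i+4] in markers:
--             return filename[:i], filename[i:]
--     return filename, ''
-- ===== Notes on version B (the rewrite author's own statement) =====
-- stated objective: alternative
-- what changed: A runs four separate rfind scans (one per marker) and keeps the maximum; B makes a single right-to-left scan over the string and returns at the first position where any of the four markers starts.
import Mathlib
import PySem

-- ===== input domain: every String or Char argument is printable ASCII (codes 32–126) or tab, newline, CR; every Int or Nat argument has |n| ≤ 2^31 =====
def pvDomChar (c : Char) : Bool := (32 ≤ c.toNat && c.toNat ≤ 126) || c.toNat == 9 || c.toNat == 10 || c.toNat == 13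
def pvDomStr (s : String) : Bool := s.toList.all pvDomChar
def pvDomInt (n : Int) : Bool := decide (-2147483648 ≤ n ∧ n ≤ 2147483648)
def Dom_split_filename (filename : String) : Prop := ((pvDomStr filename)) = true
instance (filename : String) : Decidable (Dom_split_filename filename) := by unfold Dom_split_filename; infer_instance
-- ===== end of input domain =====

-- B replaces A's four separate rfind scans by ONE right-to-left scan that stops at the
-- first (= rightmost) position where any of the four markers starts (objective: alternative).

-- ===== PORT A =====
-- literal port: four rfinds folded with `if pos > last_pos`, then slice at last_pos
def split_filename (filename : String) : String × String :=
  let patterns : List String := ["_00.", "_01.", "_02.", "_03."]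
  let last_pos : Int := patterns.foldl
    (fun last_pos pattern =>
      let pos := PySem.Str.rfind filename pattern
      if pos > last_pos then pos else last_pos) (-1)
  if last_pos ≠ -1 then
    (PySem.Str.slice filename none (some last_pos), PySem.Str.slice filename (some last_pos) none)
  else
    (filename, "")

-- ===== PORT B =====
def altMarkers : List (List Char) :=
  [['_','0','0','.'], ['_','0','1','.'], ['_','0','2','.'], ['_','0','3','.']]

-- the for-loop `for i in range(n-4, -1, -1)` as structural recursion on the index
def altGo (cs : List Char) : Nat → Option Nat
  | 0 => if altMarkers.contains (cs.take 4) then some 0 else none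
  | (i+1) => if altMarkers.contains ((cs.drop (i+1)).take 4) then some (i+1) else altGo cs i

def split_filename_alt (filename : String) : String × String :=
  let cs := filename.toList
  if cs.length < 4 then (filename, "")   -- range(n-4, -1, -1) is empty for n < 4
  else
    match altGo cs (cs.length - 4) with
    | some i => (PySem.Str.slice filename none (some (i : Int)),
                 PySem.Str.slice filename (some (i : Int)) none)
    | none => (filename, "")

-- ===== PRECONDITION & SPEC =====
def Spec_split_filename (filename : String) (out : String × String) : Prop := out = split_filename_alt filename
instance (filename : String) (out : String × String) : Decidable (Spec_split_filename filename out) := by unfold Spec_split_filename; infer_instance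

-- ===== CLAIM (what is proved, stated in full; the proofs are below) =====
def Claim_equal_split_filename : Prop := ∀ (filename : String), Dom_split_filename filename → Spec_split_filename filename (split_filename filename)

-- ===== LEMMAS AND PROOFS =====

theorem go_succ (s sub : List Char) (j : Nat) :
    PySem.Chars.rfind.go s sub (j+1) =
      if sub.isPrefixOf (s.drop (j+1)) then ((j:Int)+1) else PySem.Chars.rfind.go s sub j := by
  simp [PySem.Chars.rfind.go]

theorem go_zero (s sub : List Char) :
    PySem.Chars.rfind.go s sub 0 = if sub.isPrefixOf s then 0 else -1 := by
  simp [PySem.Chars.rfind.go]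

theorem go_le (s sub : List Char) : ∀ k, PySem.Chars.rfind.go s sub k ≤ (k : Int) := by
  intro k
  induction k with
  | zero => rw [go_zero]; split <;> omega
  | succ j ih => rw [go_succ]; split <;> [omega; (push_cast; omega)]

-- take 4 equals a 4-element pattern iff that pattern is a prefix
theorem take4_beq (p l : List Char) (hp : p.length = 4) :
    (l.take 4 == p) = p.isPrefixOf l := by
  rw [Bool.eq_iff_iff, beq_iff_eq, List.isPrefixOf_iff_prefix, List.prefix_iff_eq_take, hp]
  exact eq_comm

theorem contains_eq (l : List Char) :
    altMarkers.contains (l.take 4) =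
      (['_','0','0','.'].isPrefixOf l || ['_','0','1','.'].isPrefixOf l ||
       ['_','0','2','.'].isPrefixOf l || ['_','0','3','.'].isPrefixOf l) := by
  simp only [altMarkers, List.contains_cons, List.contains_nil, Bool.or_false, Bool.or_assoc]
  rw [take4_beq ['_','0','0','.'] l rfl, take4_beq ['_','0','1','.'] l rfl,
      take4_beq ['_','0','2','.'] l rfl, take4_beq ['_','0','3','.'] l rfl]

-- go is unchanged when the scanned prefix-free tail above j is removed
theorem go_desc (s sub : List Char) : ∀ k j, j ≤ k →
    (∀ i, j < i → i ≤ k → sub.isPrefixOf (s.drop i) = false) →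
    PySem.Chars.rfind.go s sub k = PySem.Chars.rfind.go s sub j := by
  intro k
  induction k with
  | zero => intro j hj _; interval_cases j; rfl
  | succ m ih =>
    intro j hj h
    rcases Nat.eq_or_lt_of_le hj with h1 | h1
    · rw [h1]
    · rw [go_succ, h (m+1) (by omega) (by omega)]
      simp only [Bool.false_eq_true, if_false]
      exact ih j (by omega) (fun i hi1 hi2 => h i hi1 (by omega))

-- the single right-to-left scan equals A's fold of the four rfind scans
theorem altGo_eq_fold (cs : List Char) : ∀ k,
    (altGo cs k).elim (-1 : Int) (fun i => (i:Int)) =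
      (let m : Int → Int → Int := fun lp pos => if pos > lp then pos else lp
       m (m (m (m (-1) (PySem.Chars.rfind.go cs ['_','0','0','.'] k))
            (PySem.Chars.rfind.go cs ['_','0','1','.'] k))
          (PySem.Chars.rfind.go cs ['_','0','2','.'] k))
        (PySem.Chars.rfind.go cs ['_','0','3','.'] k)) := by
  intro k
  induction k with
  | zero =>
    simp only [altGo, contains_eq, go_zero]
    rcases h0 : (['_','0','0','.'].isPrefixOf cs) <;>
      rcases h1 : (['_','0','1','.'].isPrefixOf cs) <;>
        rcases h2 : (['_','0','2','.'].isPrefixOf cs) <;>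
          rcases h3 : (['_','0','3','.'].isPrefixOf cs) <;>
            simp only [h0, h1, h2, h3, Bool.false_or, Bool.or_false, Bool.true_or,
              Bool.or_true, Bool.false_eq_true, if_true, if_false, Option.elim_some,
              Option.elim_none, ite_true, ite_false] <;>
            (split_ifs <;> omega)
  | succ j ih =>
    have l0 := go_le cs ['_','0','0','.'] j
    have l1 := go_le cs ['_','0','1','.'] j
    have l2 := go_le cs ['_','0','2','.'] j
    have l3 := go_le cs ['_','0','3','.'] j
    simp only [altGo, contains_eq, go_succ]
    rcases h0 : (['_','0','0','.'].isPrefixOf (cs.drop (j+1))) <;>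
      rcases h1 : (['_','0','1','.'].isPrefixOf (cs.drop (j+1))) <;>
        rcases h2 : (['_','0','2','.'].isPrefixOf (cs.drop (j+1))) <;>
          rcases h3 : (['_','0','3','.'].isPrefixOf (cs.drop (j+1))) <;>
            simp only [h0, h1, h2, h3, Bool.false_or, Bool.or_false, Bool.true_or,
              Bool.or_true, Bool.false_eq_true, if_true, if_false, ite_true, ite_false,
              Option.elim_some, Option.elim_none] <;>
            (first | exact ih | (split_ifs <;> push_cast <;> omega))

-- a 4-char pattern is never a prefix of a tail shorter than 4
theorem no_prefix_short (cs p : List Char) (hp : p.length = 4) (i : Nat)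
    (h : cs.length < i + 4) : p.isPrefixOf (cs.drop i) = false := by
  rcases hh : p.isPrefixOf (cs.drop i)
  · rfl
  · exfalso
    have := List.IsPrefix.length_le (List.isPrefixOf_iff_prefix.mp hh)
    simp [hp, List.length_drop] at this
    omega

-- ===== VERDICT (by name: the statement is the Claim_ definition above) =====
theorem split_filename_spec : Claim_equal_split_filename := by
  intro filename _
  unfold Spec_split_filename split_filename split_filename_alt
  simp only [List.foldl, PySem.Str.rfind_eq, PySem.Chars.rfind]
  have e0 : ("_00.".toList) = ['_','0','0','.'] := rfl
  have e1 : ("_01.".toList) = ['_','0','1','.'] := rfl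
  have e2 : ("_02.".toList) = ['_','0','2','.'] := rfl
  have e3 : ("_03.".toList) = ['_','0','3','.'] := rfl
  rw [e0, e1, e2, e3]
  set cs := filename.toList with hcs
  by_cases hlen : cs.length < 4
  · -- all four goes are -1: every tail is shorter than the pattern
    have hgo : ∀ p : List Char, p.length = 4 →
        PySem.Chars.rfind.go cs p cs.length = PySem.Chars.rfind.go cs p 0 := by
      intro p hp
      exact go_desc cs p cs.length 0 (Nat.zero_le _)
        (fun i _ hi => no_prefix_short cs p hp i (by omega))
    have hz : ∀ p : List Char, p.length = 4 → PySem.Chars.rfind.go cs p cs.length = -1 := by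
      intro p hp
      have hnp := no_prefix_short cs p hp 0 (by omega)
      rw [List.drop_zero] at hnp
      rw [hgo p hp, go_zero, hnp]
      simp
    rw [hz _ rfl, hz _ rfl, hz _ rfl, hz _ rfl]
    simp [hlen]
  · -- reduce the four scans from cs.length down to cs.length - 4, then use altGo_eq_fold
    have hk : cs.length - 4 ≤ cs.length := by omega
    have hgo : ∀ p : List Char, p.length = 4 →
        PySem.Chars.rfind.go cs p cs.length = PySem.Chars.rfind.go cs p (cs.length - 4) := by
      intro p hp
      exact go_desc cs p cs.length (cs.length - 4) hk
        (fun i hi _ => no_prefix_short cs p hp i (by omega))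
    rw [hgo _ rfl, hgo _ rfl, hgo _ rfl, hgo _ rfl]
    have hmain := altGo_eq_fold cs (cs.length - 4)
    simp only [] at hmain
    rw [← hmain]
    rcases hg : altGo cs (cs.length - 4) with _ | i
    · simp [hlen]
    · have hne : ((i : Int)) ≠ -1 := by omega
      simp [hlen, hne]
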